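-- pv_equiv track=rewrite | github.com/acieslewicz/LUTHER | lexer.py | extract_chars
-- ===== SOURCE A (Python) =====
-- def extract_chars(char_line):
--     characters = []
--     i = 0
--     char_line = char_line.strip()
--     char_line = char_line.replace(" ", "")
--     while i < len(char_line):
--         current = char_line[i]
--         if current == "x":
--             current += char_line[i+1:i+3]
--             current = current.lower()
--             i += 3
--         else:
--             current = char_to_alphabet(current)
--             i += 1
--         characters.append(current)
--
--     return characters
--
-- def char_to_alphabet(char):
--     return "x{:02x}".format(ord(char))
-- ===== SOURCE B (Python) =====
-- import re
--
--
-- def extract_chars(char_line):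
--     s = char_line.strip().replace(" ", "")
--     tokens = re.findall(r'x.{0,2}|.', s, flags=re.DOTALL)
--     return [t.lower() if t.startswith("x") else char_to_alphabet(t) for t in tokens]
--
--
-- def char_to_alphabet(char):
--     return "x{:02x}".format(ord(char))
-- ===== Notes on version B (the rewrite author's own statement) =====
-- stated objective: idiomatic
-- what changed: Replaces the hand-rolled index/slice while-loop with a regex tokenisation (re.findall(r'x.{0,2}|.', s, re.DOTALL)) followed by a per-token map.
import Mathlib
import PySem

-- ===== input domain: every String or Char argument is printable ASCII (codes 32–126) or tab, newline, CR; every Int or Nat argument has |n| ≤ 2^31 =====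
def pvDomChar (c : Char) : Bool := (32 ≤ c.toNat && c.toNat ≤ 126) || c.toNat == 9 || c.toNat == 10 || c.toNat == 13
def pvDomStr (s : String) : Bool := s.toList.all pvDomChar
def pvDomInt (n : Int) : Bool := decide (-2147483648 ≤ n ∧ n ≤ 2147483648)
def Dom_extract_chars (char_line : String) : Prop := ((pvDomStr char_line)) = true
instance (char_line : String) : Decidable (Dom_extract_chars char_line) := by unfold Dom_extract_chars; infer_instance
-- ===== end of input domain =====

-- B replaces A's index/slice while-loop by a regex tokenisation ('x.{0,2}|.') followed by a map; same cost, more idiomatic.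

-- shared helper: "x{:02x}".format(ord(char)) — exact for code points < 256 (Dom admits only codes ≤ 126)
def hexDigit (n : Nat) : Char := if n < 10 then Char.ofNat (48 + n) else Char.ofNat (87 + n)
def char_to_alphabet (c : Char) : String := String.ofList ['x', hexDigit (c.toNat / 16), hexDigit (c.toNat % 16)]

-- ===== PORT A =====
-- the while-loop: i the index, cons-building the appended list
def aLoop (cs : List Char) (i : Nat) : List String :=
  if h : i < cs.length then
    if cs[i] = 'x' then
      -- current = ("x" + char_line[i+1:i+3]).lower()
      String.ofList (PySem.Chars.lower ('x' :: PySem.List.slice cs (some ((i : Int) + 1)) (some ((i : Int) + 3))))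
        :: aLoop cs (i + 3)
    else
      char_to_alphabet cs[i] :: aLoop cs (i + 1)
  else []
termination_by cs.length - i

def extract_chars (char_line : String) : List String :=
  aLoop ((PySem.Str.replace (PySem.Str.strip char_line) " " "").toList) 0

-- ===== PORT B =====
-- re.findall(r'x.{0,2}|.', s, re.DOTALL): an 'x' starts a greedy up-to-3-char token, any other char is its own token
def bTokenize (cs : List Char) : List (List Char) :=
  match cs with
  | [] => []
  | c :: rest =>
    if c = 'x' then ('x' :: rest.take 2) :: bTokenize (rest.drop 2)
    else [c] :: bTokenize rest
termination_by cs.length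

-- t.lower() if t.startswith("x") else char_to_alphabet(t)  (non-x tokens are single chars)
def bDecode (t : List Char) : String :=
  if PySem.Chars.startswith t ['x'] then String.ofList (PySem.Chars.lower t)
  else match t with
       | c :: _ => char_to_alphabet c
       | [] => ""

def extract_chars_alt (char_line : String) : List String :=
  (bTokenize ((PySem.Str.replace (PySem.Str.strip char_line) " " "").toList)).map bDecode

-- ===== PRECONDITION & SPEC =====
def Spec_extract_chars (char_line : String) (out : List String) : Prop := out = extract_chars_alt char_line
instance (char_line : String) (out : List String) : Decidable (Spec_extract_chars char_line out) := by unfold Spec_extract_chars; infer_instance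

-- ===== CLAIM (what is proved, stated in full; the proofs are below) =====
def Claim_equal_extract_chars : Prop := ∀ (char_line : String), Dom_extract_chars char_line → Spec_extract_chars char_line (extract_chars char_line)

-- ===== LEMMAS AND PROOFS =====

theorem aLoop_eq_drop (cs : List Char) (i : Nat) :
    aLoop cs i = (bTokenize (cs.drop i)).map bDecode := by
  have key : ∀ n i, cs.length - i ≤ n → aLoop cs i = (bTokenize (cs.drop i)).map bDecode := by
    intro n
    induction n with
    | zero =>
      intro i hi
      have hge : cs.length ≤ i := by omega
      rw [aLoop]
      simp [List.drop_eq_nil_of_le hge, bTokenize, Nat.not_lt_of_le hge]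
    | succ n ih =>
      intro i hi
      by_cases h : i < cs.length
      · have hdrop : cs.drop i = cs[i] :: cs.drop (i + 1) := List.drop_eq_getElem_cons h
        rw [aLoop, dif_pos h, hdrop, bTokenize]
        by_cases hx : cs[i] = 'x'
        · simp only [if_pos hx, List.map_cons]
          have hslice : PySem.List.slice cs (some ((i : Int) + 1)) (some ((i : Int) + 3))
              = (cs.drop (i + 1)).take 2 := by
            have := PySem.List.slice_natCast (xs := cs) (a := i + 1) (b := i + 3)
            push_cast at this
            simpa using this
          have hrest : (cs.drop (i + 1)).drop 2 = cs.drop (i + 3) := by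
            rw [List.drop_drop]
          rw [hslice, hrest, ih (i + 3) (by omega)]
          congr 1
        · simp only [if_neg hx, List.map_cons]
          rw [ih (i + 1) (by omega)]
          congr 1
          simp only [bDecode, PySem.Chars.startswith]
          simp
          intro h'
          exact absurd h'.symm hx
      · have hge : cs.length ≤ i := by omega
        rw [aLoop]
        simp [List.drop_eq_nil_of_le hge, bTokenize, h]
  exact key (cs.length - i) i le_rfl

-- ===== VERDICT (by name: the statement is the Claim_ definition above) =====
theorem extract_chars_spec : Claim_equal_extract_chars := by
  intro s _
  unfold Spec_extract_chars extract_chars extract_chars_alt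
  simpa using aLoop_eq_drop ((PySem.Str.replace (PySem.Str.strip s) " " "").toList) 0
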